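-- pv_equiv track=rewrite | github.com/TheLostWeak/openevolve | examples/cap_set_example/evaluator.py | _subtract_vectors_int
-- ===== SOURCE A (Python) =====
-- def _subtract_vectors_int(a_int: int, b_int: int, n: int) -> int:
--     """计算 a - b (模3)。"""
--     result = 0
--     for i in range(n):
--         a_digit = a_int % 3
--         b_digit = b_int % 3
--         diff = (a_digit - b_digit) % 3
--         result += diff * (3 ** i)
--         a_int //= 3
--         b_int //= 3
--     return result
-- ===== SOURCE B (Python) =====
-- def _subtract_vectors_int(a_int: int, b_int: int, n: int) -> int:
--     """a - b digit-wise mod 3: collect per-digit diffs, then Horner reconstruction."""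
--     diffs = []
--     for _ in range(n):
--         diffs.append((a_int % 3 - b_int % 3) % 3)
--         a_int //= 3
--         b_int //= 3
--     result = 0
--     for d in reversed(diffs):
--         result = result * 3 + d
--     return result
-- ===== Notes on version B (the rewrite author's own statement) =====
-- stated objective: faster
-- what changed: Replaces the single fused loop that accumulates diff*(3**i) with two separately-shaped passes: one pass extracting the per-digit mod-3 differences into a list, then a Horner reconstruction (result = result*3 + d) in most-significant-first order, removing the 3**i big-integer power computed anew each iteration.
import Mathlib
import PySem

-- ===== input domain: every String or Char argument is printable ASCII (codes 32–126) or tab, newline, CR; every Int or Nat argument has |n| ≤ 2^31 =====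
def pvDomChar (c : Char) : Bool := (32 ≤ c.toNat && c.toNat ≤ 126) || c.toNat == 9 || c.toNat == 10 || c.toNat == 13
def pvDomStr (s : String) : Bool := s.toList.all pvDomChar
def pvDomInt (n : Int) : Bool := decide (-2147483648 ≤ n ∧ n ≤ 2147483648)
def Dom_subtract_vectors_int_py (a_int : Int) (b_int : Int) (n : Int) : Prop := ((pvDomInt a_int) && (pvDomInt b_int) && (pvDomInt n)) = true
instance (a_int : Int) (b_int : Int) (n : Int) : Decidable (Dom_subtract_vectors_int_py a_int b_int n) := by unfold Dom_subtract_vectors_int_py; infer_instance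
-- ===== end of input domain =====

-- B splits the fused diff*(3**i) accumulation into a digit-diff extraction pass plus a Horner reconstruction pass, eliminating the per-iteration power (measured faster).

-- ===== PORT A =====
-- literal port of A: one fused loop over range(n), result += ((a%3 - b%3) % 3) * 3**i
def subtract_vectors_int_py (a_int : Int) (b_int : Int) (n : Int) : Int :=
  ((PySem.List.pyRange 0 n 1).foldl
    (fun (st : Int × Int × Int) (i : Int) =>
      let a_digit := PySem.Int.mod st.2.1 3
      let b_digit := PySem.Int.mod st.2.2 3
      let diff := PySem.Int.mod (a_digit - b_digit) 3
      (st.1 + diff * (3 : Int) ^ i.toNat, PySem.Int.floordiv st.2.1 3, PySem.Int.floordiv st.2.2 3))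
    (0, a_int, b_int)).1

-- ===== PORT B =====
-- B pass 1: collect the per-digit diffs (insertion order = least-significant first)
def pvDiffList (a_int : Int) (b_int : Int) : Nat → List Int
  | 0 => []
  | k+1 =>
      PySem.Int.mod (PySem.Int.mod a_int 3 - PySem.Int.mod b_int 3) 3 ::
        pvDiffList (PySem.Int.floordiv a_int 3) (PySem.Int.floordiv b_int 3) k

-- B pass 2: Horner over the reversed diff list
def subtract_vectors_int_py_alt (a_int : Int) (b_int : Int) (n : Int) : Int :=
  (pvDiffList a_int b_int n.toNat).reverse.foldl (fun r d => r * 3 + d) 0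

-- ===== PRECONDITION & SPEC =====
def Spec_subtract_vectors_int_py (a_int : Int) (b_int : Int) (n : Int) (out : Int) : Prop := out = subtract_vectors_int_py_alt a_int b_int n
instance (a_int : Int) (b_int : Int) (n : Int) (out : Int) : Decidable (Spec_subtract_vectors_int_py a_int b_int n out) := by unfold Spec_subtract_vectors_int_py; infer_instance

-- ===== CLAIM (what is proved, stated in full; the proofs are below) =====
def Claim_equal_subtract_vectors_int_py : Prop := ∀ (a_int : Int) (b_int : Int) (n : Int), Dom_subtract_vectors_int_py a_int b_int n → Spec_subtract_vectors_int_py a_int b_int n (subtract_vectors_int_py a_int b_int n)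

-- ===== LEMMAS AND PROOFS =====

-- value of a digit list, least-significant first
def pvVal : List Int → Int
  | [] => 0
  | d :: t => d + 3 * pvVal t

-- Horner over the reversed list computes pvVal
theorem pvHorner_eq (l : List Int) (r : Int) :
    l.reverse.foldl (fun r d => r * 3 + d) r = r * 3 ^ l.length + pvVal l := by
  induction l generalizing r with
  | nil => simp [pvVal]
  | cons d t ih =>
      simp only [List.reverse_cons, List.foldl_append, List.foldl_cons, List.foldl_nil, ih,
        pvVal, List.length_cons]
      ring

-- A's loop from index k over m iterations adds 3^k * pvVal of the diff list
theorem pvLoop_eq (m : Nat) : ∀ (k : Int), 0 ≤ k → ∀ (r a b : Int),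
    ((PySem.List.pyRange k (k + (m : Nat)) 1).foldl
      (fun (st : Int × Int × Int) (i : Int) =>
        let a_digit := PySem.Int.mod st.2.1 3
        let b_digit := PySem.Int.mod st.2.2 3
        let diff := PySem.Int.mod (a_digit - b_digit) 3
        (st.1 + diff * (3 : Int) ^ i.toNat, PySem.Int.floordiv st.2.1 3, PySem.Int.floordiv st.2.2 3))
      (r, a, b)).1 = r + 3 ^ k.toNat * pvVal (pvDiffList a b m) := by
  induction m with
  | zero =>
      intro k hk r a b
      rw [PySem.List.pyRange_one_eq_nil (by push_cast; omega)]
      simp [pvDiffList, pvVal]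
  | succ m ih =>
      intro k hk r a b
      rw [PySem.List.pyRange_one_cons (by push_cast; omega)]
      simp only [List.foldl_cons]
      have h2 : k + ((m + 1 : Nat) : Int) = (k + 1) + ((m : Nat) : Int) := by push_cast; ring
      rw [h2, ih (k + 1) (by omega)]
      have h3 : (k + 1).toNat = k.toNat + 1 := by omega
      simp only [pvDiffList, pvVal, h3, pow_succ]
      ring

theorem subtract_vectors_int_py_eq (a b n : Int) :
    subtract_vectors_int_py a b n = subtract_vectors_int_py_alt a b n := by
  unfold subtract_vectors_int_py subtract_vectors_int_py_alt
  rw [pvHorner_eq]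
  by_cases h : n ≤ 0
  · rw [PySem.List.pyRange_one_eq_nil h]
    have : n.toNat = 0 := by omega
    simp [this, pvDiffList, pvVal]
  · have := pvLoop_eq n.toNat 0 (le_refl 0) 0 a b
    rw [show ((0:Int) + ((n.toNat : Nat) : Int)) = n from by omega] at this
    rw [this]
    simp

-- ===== VERDICT (by name: the statement is the Claim_ definition above) =====
theorem subtract_vectors_int_py_spec : Claim_equal_subtract_vectors_int_py := by
  intro a b n _
  unfold Spec_subtract_vectors_int_py
  exact subtract_vectors_int_py_eq a b n
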